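-- pv_equiv track=rewrite | github.com/psecola/ECE-792-CT-Image | CT_annotation_tool/pv_helper_Mac.py | cord_compare
-- ===== SOURCE A (Python) =====
-- def cord_compare(current_cords, past_cords):
--
--     #Finds different x,y,z coordinates from all possible plane widget
--     x_cords = [current_cords[0] for current_cords in current_cords if current_cords[0] != past_cords['x']] # Checks if any x coordinates changed in planes
--     y_cords = [current_cords[1] for current_cords in current_cords if current_cords[1] != past_cords['y']] # Checks if any y coordinates changed in planes
--     z_cords = [current_cords[2] for current_cords in current_cords if current_cords[2] != past_cords['z']] # Checks if any z coordinates changed in planes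
--
--     if len(x_cords) != 0:
--         past_cords['x'] = x_cords[0] # extract first different value of x plane widget coordinate
--     if len(y_cords) != 0:
--         past_cords['y'] = y_cords[0] # extract first different value of y plane widget coordinate
--     if len(z_cords) != 0:
--         past_cords['z'] = z_cords[0] # extract first different value of z plane widget coordinate
--
--     return past_cords
-- ===== SOURCE B (Python) =====
-- def cord_compare(current_cords, past_cords):
--     # Single pass with found-flags instead of three full list comprehensions.
--     if not current_cords:
--         return past_cords
--     ox = past_cords['x']
--     oy = past_cords['y']
--     oz = past_cords['z']
--     nx, ny, nz = ox, oy, oz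
--     xf = yf = zf = False
--     for cx, cy, cz in current_cords:
--         if not xf and cx != ox:
--             nx, xf = cx, True
--         if not yf and cy != oy:
--             ny, yf = cy, True
--         if not zf and cz != oz:
--             nz, zf = cz, True
--         if xf and yf and zf:
--             break
--     past_cords['x'] = nx
--     past_cords['y'] = ny
--     past_cords['z'] = nz
--     return past_cords
-- ===== Notes on version B (the rewrite author's own statement) =====
-- stated objective: faster
-- what changed: Replaces the three full filter-map comprehensions (each scanning the whole list) with one single pass over current_cords that keeps three found-flags and breaks as soon as all three first-changed coordinates are found.
import Mathlib
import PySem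

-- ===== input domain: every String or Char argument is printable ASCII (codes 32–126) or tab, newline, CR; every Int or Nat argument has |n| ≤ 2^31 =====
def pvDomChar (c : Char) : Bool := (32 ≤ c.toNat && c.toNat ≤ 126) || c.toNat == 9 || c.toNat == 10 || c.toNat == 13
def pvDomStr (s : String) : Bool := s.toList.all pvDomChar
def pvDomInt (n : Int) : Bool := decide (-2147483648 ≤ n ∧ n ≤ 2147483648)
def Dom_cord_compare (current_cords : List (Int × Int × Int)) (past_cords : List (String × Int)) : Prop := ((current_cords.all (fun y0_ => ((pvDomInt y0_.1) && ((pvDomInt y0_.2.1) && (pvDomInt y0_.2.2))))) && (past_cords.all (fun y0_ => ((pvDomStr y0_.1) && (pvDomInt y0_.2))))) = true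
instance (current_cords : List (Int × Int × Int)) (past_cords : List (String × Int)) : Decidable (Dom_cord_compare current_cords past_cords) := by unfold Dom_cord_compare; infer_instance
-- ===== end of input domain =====

-- B replaces A's three full filter-map scans by one single pass with found-flags and an early break;
-- both Pythons mutate past_cords in place with the same final contents, the equivalence proved is about the return value.


-- ===== PORT A =====
-- Literal port of A: build the three comprehension lists against the original dict values,
-- then conditionally assign the head of each. (The fallback arm is the region where the Python
-- raises KeyError, excluded by Pre_ below.)
def cord_compare (current_cords : List (Int × Int × Int)) (past_cords : List (String × Int)) : List (String × Int) :=
  let d := PySem.Dict.ofList past_cords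
  match d.get? "x", d.get? "y", d.get? "z" with
  | some px, some py, some pz =>
    let x_cords := (current_cords.filter (fun c => c.1 != px)).map (·.1)
    let y_cords := (current_cords.filter (fun c => c.2.1 != py)).map (·.2.1)
    let z_cords := (current_cords.filter (fun c => c.2.2 != pz)).map (·.2.2)
    let d1 := match x_cords with | [] => d | v :: _ => d.insert "x" v
    let d2 := match y_cords with | [] => d1 | v :: _ => d1.insert "y" v
    let d3 := match z_cords with | [] => d2 | v :: _ => d2.insert "z" v
    d3.items
  | _, _, _ => d.items

-- ===== PORT B =====
-- B's loop: one pass maintaining (value, found-flag) per axis, breaking once all three are found.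
def cordLoop (ox oy oz : Int) : List (Int × Int × Int) → (Int × Bool) → (Int × Bool) → (Int × Bool) → Int × Int × Int
  | [], sx, sy, sz => (sx.1, sy.1, sz.1)
  | c :: rest, sx, sy, sz =>
    let sx' := if !sx.2 && c.1 != ox then (c.1, true) else sx
    let sy' := if !sy.2 && c.2.1 != oy then (c.2.1, true) else sy
    let sz' := if !sz.2 && c.2.2 != oz then (c.2.2, true) else sz
    if sx'.2 && sy'.2 && sz'.2 then (sx'.1, sy'.1, sz'.1)
    else cordLoop ox oy oz rest sx' sy' sz'

def cord_compare_alt (current_cords : List (Int × Int × Int)) (past_cords : List (String × Int)) : List (String × Int) :=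
  let d := PySem.Dict.ofList past_cords
  if current_cords.isEmpty then d.items else
  match d.get? "x" with
  | none => d.items
  | some ox =>
    match d.get? "y" with
    | none => d.items
    | some oy =>
      match d.get? "z" with
      | none => d.items
      | some oz =>
        let r := cordLoop ox oy oz current_cords (ox, false) (oy, false) (oz, false)
        (((d.insert "x" r.1).insert "y" r.2.1).insert "z" r.2.2).items

-- ===== PRECONDITION & SPEC =====
-- Pre_ excludes exactly the inputs where the Python A raises KeyError: a nonempty widget list
-- together with a dict missing one of the keys 'x','y','z' (with an empty widget list A's lazy
-- comprehensions never read the keys, so those inputs stay inside Pre_; B raises there too).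
def Pre_cord_compare (current_cords : List (Int × Int × Int)) (past_cords : List (String × Int)) : Prop :=
  current_cords = [] ∨
    (((PySem.Dict.ofList past_cords).get? "x").isSome ∧
     ((PySem.Dict.ofList past_cords).get? "y").isSome ∧
     ((PySem.Dict.ofList past_cords).get? "z").isSome)
instance (current_cords : List (Int × Int × Int)) (past_cords : List (String × Int)) : Decidable (Pre_cord_compare current_cords past_cords) := by unfold Pre_cord_compare; infer_instance

def pvWitness_cord_compare : (List (Int × Int × Int)) × (List (String × Int)) :=
  ([(1, 2, 3), (1, 5, 3)], [("x", 1), ("y", 2), ("z", 4)])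

def Spec_cord_compare (current_cords : List (Int × Int × Int)) (past_cords : List (String × Int)) (out : List (String × Int)) : Prop := out = cord_compare_alt current_cords past_cords
instance (current_cords : List (Int × Int × Int)) (past_cords : List (String × Int)) (out : List (String × Int)) : Decidable (Spec_cord_compare current_cords past_cords out) := by unfold Spec_cord_compare; infer_instance

-- ===== CLAIM (what is proved, stated in full; the proofs are below) =====
def Claim_equal_cord_compare : Prop := ∀ (current_cords : List (Int × Int × Int)) (past_cords : List (String × Int)), Dom_cord_compare current_cords past_cords → Pre_cord_compare current_cords past_cords → Spec_cord_compare current_cords past_cords (cord_compare current_cords past_cords)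

-- ===== LEMMAS AND PROOFS =====

-- B's loop computes, per axis, the first element differing from the original value (or keeps the
-- carried value if the flag is already set / nothing differs).
theorem cordLoop_eq (cc : List (Int × Int × Int)) : ∀ (ox oy oz nx ny nz : Int) (xf yf zf : Bool),
    cordLoop ox oy oz cc (nx, xf) (ny, yf) (nz, zf) =
      ((if xf then nx else ((cc.filter (fun c => c.1 != ox)).map (·.1)).headD nx),
       (if yf then ny else ((cc.filter (fun c => c.2.1 != oy)).map (·.2.1)).headD ny),
       (if zf then nz else ((cc.filter (fun c => c.2.2 != oz)).map (·.2.2)).headD nz)) := by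
  induction cc with
  | nil => intro ox oy oz nx ny nz xf yf zf; simp [cordLoop]
  | cons c rest ih =>
    intro ox oy oz nx ny nz xf yf zf
    simp only [cordLoop, List.filter_cons]
    by_cases hx : c.1 = ox <;> by_cases hy : c.2.1 = oy <;> by_cases hz : c.2.2 = oz <;>
      cases xf <;> cases yf <;> cases zf <;>
      simp [hx, hy, hz, ih]

-- Re-inserting the value a key already holds is a no-op (keys of an ofList dict are unique).
theorem insert_get_self {d : PySem.Dict String Int} {k : String} {v : Int}
    (hn : d.keys.Nodup) (h : d.get? k = some v) : d.insert k v = d := by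
  apply PySem.Dict.ext
  have hc : d.contains k = true := by rw [PySem.Dict.contains_eq_isSome_get?, h]; rfl
  rw [PySem.Dict.items_insert_of_contains d v hc]
  have hmap : ∀ p ∈ d.items, (fun q : String × Int => if q.1 == k then (k, v) else q) p = id p := by
    intro p hp
    obtain ⟨pk, pv⟩ := p
    by_cases hk : pk = k
    · have h2 := PySem.Dict.get?_of_mem_items d hp hn
      rw [hk, h] at h2
      simp [hk, Option.some.inj h2]
    · simp [hk]
  rw [List.map_congr_left hmap, List.map_id]

-- A's conditional head-assignment equals an unconditional insert of headD (original value).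
theorem stage_eq {d : PySem.Dict String Int} {k : String} {o : Int} (l : List Int)
    (hn : d.keys.Nodup) (h : d.get? k = some o) :
    (match l with | [] => d | v :: _ => d.insert k v) = d.insert k (l.headD o) := by
  cases l with
  | nil => simp [insert_get_self hn h]
  | cons v t => rfl

-- ===== VERDICT (by name: the statement is the Claim_ definition above) =====
theorem cord_compare_spec : Claim_equal_cord_compare := by
  intro cc pc _hdom hpre
  unfold Spec_cord_compare
  cases hcc : cc with
  | nil =>
    unfold cord_compare cord_compare_alt
    cases hx : (PySem.Dict.ofList pc).get? "x" <;>
      cases hy : (PySem.Dict.ofList pc).get? "y" <;>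
        cases hz : (PySem.Dict.ofList pc).get? "z" <;> simp [hx, hy, hz]
  | cons c rest =>
    subst hcc
    rcases hpre with h | ⟨hx, hy, hz⟩
    · simp at h
    obtain ⟨ox, hx⟩ := Option.isSome_iff_exists.mp hx
    obtain ⟨oy, hy⟩ := Option.isSome_iff_exists.mp hy
    obtain ⟨oz, hz⟩ := Option.isSome_iff_exists.mp hz
    have hn : (PySem.Dict.ofList pc).keys.Nodup := PySem.Dict.nodup_keys_ofList pc
    unfold cord_compare cord_compare_alt
    simp only [hx, hy, hz]
    rw [cordLoop_eq]
    simp only [Bool.false_eq_true, if_false]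
    rw [stage_eq _ hn hx]
    rw [stage_eq _ (PySem.Dict.nodup_keys_insert _ _ _ hn) (by
      rw [PySem.Dict.get?_insert_of_ne _ _ (by decide)]; exact hy)]
    rw [stage_eq _ (PySem.Dict.nodup_keys_insert _ _ _ (PySem.Dict.nodup_keys_insert _ _ _ hn)) (by
      rw [PySem.Dict.get?_insert_of_ne _ _ (by decide), PySem.Dict.get?_insert_of_ne _ _ (by decide)]; exact hz)]
    simp
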